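-- pv_equiv track=rewrite | github.com/erezlahav/TORRENT_PROJECT | tracker.py | Peer_User_index_in_list
-- ===== SOURCE A (Python) =====
-- def Peer_User_index_in_list(peer_id, users_list) -> int:  #if not in list return -1, if in list return its index
--     index = 0
--     user_found_index = -1
--     for user in users_list:
--         if user.get("peer_id") == peer_id:
--             user_found_index = index
--         index += 1
--     return user_found_index
-- ===== SOURCE B (Python) =====
-- def Peer_User_index_in_list(peer_id, users_list) -> int:
--     # reversed early-exit search: the first match from the end is the last match
--     for i in range(len(users_list) - 1, -1, -1):
--         if users_list[i].get("peer_id") == peer_id: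
--             return i
--     return -1
-- ===== Notes on version B (the rewrite author's own statement) =====
-- stated objective: alternative
-- what changed: Replaces the forward full scan that keeps overwriting an accumulator with a reversed early-exit search that returns the first match seen from the end (the same last-match index), -1 if none.
import Mathlib
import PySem

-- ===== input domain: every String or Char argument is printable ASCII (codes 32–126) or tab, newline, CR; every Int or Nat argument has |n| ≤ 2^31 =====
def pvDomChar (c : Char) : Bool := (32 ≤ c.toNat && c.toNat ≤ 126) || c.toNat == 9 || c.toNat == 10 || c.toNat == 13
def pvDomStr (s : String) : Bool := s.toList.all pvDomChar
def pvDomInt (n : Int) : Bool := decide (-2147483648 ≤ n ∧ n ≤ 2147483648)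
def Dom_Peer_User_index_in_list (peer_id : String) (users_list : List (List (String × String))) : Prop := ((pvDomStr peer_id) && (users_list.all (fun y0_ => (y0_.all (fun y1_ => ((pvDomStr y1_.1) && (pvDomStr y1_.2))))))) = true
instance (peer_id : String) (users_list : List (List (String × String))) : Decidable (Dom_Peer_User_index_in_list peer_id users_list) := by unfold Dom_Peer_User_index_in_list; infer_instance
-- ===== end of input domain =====

-- B replaces A's forward full scan with an accumulator by a reversed early-exit
-- index search (first match from the end = last match, -1 if none); same result.

-- user.get("peer_id"): first-match lookup in the association list (Python dict)
def pvGetPeer (user : List (String × String)) : Option String :=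
  (PySem.Dict.mk user).get? "peer_id"

-- ===== PORT A =====
-- loop body of A: state (index, user_found_index)
def pvStepA (peer_id : String) (st : Int × Int) (user : List (String × String)) : Int × Int :=
  (st.1 + 1, if pvGetPeer user == some peer_id then st.1 else st.2)

def Peer_User_index_in_list (peer_id : String) (users_list : List (List (String × String))) : Int :=
  (users_list.foldl (pvStepA peer_id) (0, -1)).2

-- ===== PORT B =====
-- the 'for i in range(len-1, -1, -1): … return i' loop, early exit as recursion
def pvAltLoop (peer_id : String) (users_list : List (List (String × String))) : List Int → Int
  | [] => -1
  | i :: rest =>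
      if pvGetPeer (PySem.List.pyGetD users_list i []) == some peer_id then i
      else pvAltLoop peer_id users_list rest

def Peer_User_index_in_list_alt (peer_id : String) (users_list : List (List (String × String))) : Int :=
  pvAltLoop peer_id users_list (PySem.List.pyRange ((users_list.length : Int) - 1) (-1) (-1))

-- ===== PRECONDITION & SPEC =====
def Spec_Peer_User_index_in_list (peer_id : String) (users_list : List (List (String × String))) (out : Int) : Prop := out = Peer_User_index_in_list_alt peer_id users_list
instance (peer_id : String) (users_list : List (List (String × String))) (out : Int) : Decidable (Spec_Peer_User_index_in_list peer_id users_list out) := by unfold Spec_Peer_User_index_in_list; infer_instance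

-- ===== CLAIM (what is proved, stated in full; the proofs are below) =====
def Claim_equal_Peer_User_index_in_list : Prop := ∀ (peer_id : String) (users_list : List (List (String × String))), Dom_Peer_User_index_in_list peer_id users_list → Spec_Peer_User_index_in_list peer_id users_list (Peer_User_index_in_list peer_id users_list)

-- ===== LEMMAS AND PROOFS =====

theorem pvFoldA_fst (peer_id : String) (l : List (List (String × String))) :
    ∀ (i0 f0 : Int), (l.foldl (pvStepA peer_id) (i0, f0)).1 = i0 + l.length := by
  induction l with
  | nil => intro i0 f0; simp
  | cons u t ih =>
      intro i0 f0
      simp only [List.foldl_cons, pvStepA, ih, List.length_cons]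
      push_cast
      ring

theorem pvLoop_take (peer_id : String) (l : List (List (String × String))) :
    ∀ (k : Nat), k ≤ l.length →
      pvAltLoop peer_id l (PySem.List.pyRange ((k : Int) - 1) (-1) (-1))
        = ((l.take k).foldl (pvStepA peer_id) (0, -1)).2 := by
  intro k
  induction k with
  | zero =>
      intro _
      rw [PySem.List.pyRange_neg_one_eq_nil (by omega)]
      simp [pvAltLoop]
  | succ k ih =>
      intro hk
      have hklt : k < l.length := by omega
      have hcons : PySem.List.pyRange (((k + 1 : Nat) : Int) - 1) (-1) (-1)
          = (k : Int) :: PySem.List.pyRange ((k : Int) - 1) (-1) (-1) := by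
        have := PySem.List.pyRange_neg_one_cons (a := (k : Int)) (b := -1) (by omega)
        push_cast
        simpa using this
      rw [hcons]
      simp only [pvAltLoop]
      rw [PySem.List.pyGetD_natCast]
      have hget : l.getD k [] = l[k] := List.getD_eq_getElem l [] hklt
      have htake : l.take (k + 1) = l.take k ++ [l[k]] := by
        rw [List.take_add_one]
        simp [List.getElem?_eq_getElem hklt]
      rw [hget, htake, List.foldl_append]
      have hfst : ((l.take k).foldl (pvStepA peer_id) (0, -1)).1 = (k : Int) := by
        rw [pvFoldA_fst]
        simp [List.length_take, Nat.min_eq_left (le_of_lt hklt)]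
      simp only [List.foldl_cons, List.foldl_nil, pvStepA, hfst]
      by_cases hP : pvGetPeer l[k] == some peer_id
      · simp [hP]
      · simp [hP, ih (le_of_lt hklt)]

-- ===== VERDICT (by name: the statement is the Claim_ definition above) =====
theorem Peer_User_index_in_list_spec : Claim_equal_Peer_User_index_in_list := by
  intro peer_id users_list _
  unfold Spec_Peer_User_index_in_list Peer_User_index_in_list Peer_User_index_in_list_alt
  have h := pvLoop_take peer_id users_list users_list.length (le_refl _)
  rw [List.take_length] at h
  exact h.symm
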